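-- pv_equiv track=rewrite | github.com/WangYingke/Hidden_Messages_in_DNA | ComputeFrequencies.py | IndexToPattern
-- ===== SOURCE A (Python) =====
-- def IndexToPattern(index,k):
--     nucleotide_code = {0:"A",1:"C",2:"G",3:"T"}
--     pattern = ""
--     for i in range(k):
--         reminder = index%4
--         nucleotide = nucleotide_code[reminder]
--         pattern += nucleotide
--         index = index//4
--         i+=1
--     pattern = pattern[::-1]
--     return pattern
-- ===== SOURCE B (Python) =====
-- def IndexToPattern(index, k):
--     # Divide and conquer on k: split the k-mer into its upper k-h and lower h
--     # nucleotides with one divmod by 4**h, and recurse (depth log2 k).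
--     if k <= 0:
--         return ""
--     if k == 1:
--         return "ACGT"[index % 4]
--     h = k // 2
--     q, r = divmod(index, 4 ** h)
--     return IndexToPattern(q, k - h) + IndexToPattern(r, h)
-- ===== Notes on version B (the rewrite author's own statement) =====
-- stated objective: alternative
-- what changed: Replaced the stateful digit-by-digit accumulate-then-reverse loop (dict lookup, running quotient, final string reversal) by a divide-and-conquer that splits the k-mer into upper and lower halves with one divmod by 4**(k//2) and recurses, building the string most-significant-first with no reversal.
import Mathlib
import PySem

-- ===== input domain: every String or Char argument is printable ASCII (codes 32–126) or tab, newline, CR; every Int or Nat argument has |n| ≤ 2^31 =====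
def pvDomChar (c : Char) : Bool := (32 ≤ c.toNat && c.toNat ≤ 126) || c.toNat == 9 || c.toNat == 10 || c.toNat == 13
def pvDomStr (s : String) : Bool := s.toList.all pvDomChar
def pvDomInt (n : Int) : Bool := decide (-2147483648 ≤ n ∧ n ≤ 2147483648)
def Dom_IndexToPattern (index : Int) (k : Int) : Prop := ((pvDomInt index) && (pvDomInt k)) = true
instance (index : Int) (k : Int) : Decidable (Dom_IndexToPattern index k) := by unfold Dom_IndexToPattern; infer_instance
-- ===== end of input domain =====

-- B replaces A's stateful accumulate-then-reverse loop by a divide-and-conquer on k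
-- (split the k-mer with one divmod by 4**(k//2) and recurse): objective 'alternative'.

-- ===== PORT A =====
-- A's dict {0:"A",1:"C",2:"G",3:"T"} maps to single characters; the loop state is
-- (pattern as List Char, index). The lookup key is index % 4 ∈ {0,1,2,3}, so the
-- dict access never raises; `.getD ' '` is exact (the default is unreachable).
def IndexToPattern (index : Int) (k : Int) : String :=
  let nucleotide_code : PySem.Dict Int Char :=
    PySem.Dict.ofList [(0, 'A'), (1, 'C'), (2, 'G'), (3, 'T')]
  let st :=
    (PySem.List.pyRange 0 k 1).foldl
      (fun (st : List Char × Int) _i =>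
        let reminder := PySem.Int.mod st.2 4
        let nucleotide := (nucleotide_code.get? reminder).getD ' '
        (st.1 ++ [nucleotide], PySem.Int.floordiv st.2 4))
      ([], index)
  -- pattern = pattern[::-1] is List.reverse (PySem.List.slice?_none_none_neg_one)
  String.ofList st.1.reverse

-- ===== PORT B =====
-- helper for B's port: the characters it builds ("" ↔ []); "ACGT"[index % 4] with
-- index % 4 ∈ {0,1,2,3}: pyGet? never raises, `.getD ' '` is exact. 4 ** h has h ≥ 1
-- here, so it is (4 : Int) ^ h.toNat and is nonzero: divmod? never returns none and
-- `.getD (0, 0)` is exact.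
def pvAltChars (index : Int) (k : Int) : List Char :=
  if k ≤ 0 then []
  else if k = 1 then [(PySem.Str.pyGet? "ACGT" (PySem.Int.mod index 4)).getD ' ']
  else
    let h := PySem.Int.floordiv k 2
    let qr := (PySem.Int.divmod? index ((4 : Int) ^ h.toNat)).getD (0, 0)
    pvAltChars qr.1 (k - h) ++ pvAltChars qr.2 h
termination_by k.toNat
decreasing_by
  all_goals
    rw [PySem.Int.floordiv_eq_ediv_of_pos (by norm_num : (0:Int) < 2)]
    omega

def IndexToPattern_alt (index : Int) (k : Int) : String :=
  String.ofList (pvAltChars index k)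

-- ===== PRECONDITION & SPEC =====
def Spec_IndexToPattern (index : Int) (k : Int) (out : String) : Prop := out = IndexToPattern_alt index k
instance (index : Int) (k : Int) (out : String) : Decidable (Spec_IndexToPattern index k out) := by unfold Spec_IndexToPattern; infer_instance

-- ===== CLAIM (what is proved, stated in full; the proofs are below) =====
def Claim_equal_IndexToPattern : Prop := ∀ (index : Int) (k : Int), Dom_IndexToPattern index k → Spec_IndexToPattern index k (IndexToPattern index k)

-- ===== LEMMAS AND PROOFS =====

-- canonical digit → nucleotide map, for r ∈ {0,1,2,3}
def pvNuc (r : Int) : Char :=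
  if r = 0 then 'A' else if r = 1 then 'C' else if r = 2 then 'G' else 'T'

-- the j-th base-4 digit of i, as a nucleotide
def pvDig (i : Int) (j : Nat) : Char :=
  pvNuc (PySem.Int.mod (PySem.Int.floordiv i ((4 : Int) ^ j)) 4)

-- least-significant-first digit characters of `i`, n of them (A's loop body, abstracted)
def pvLsb (i : Int) : Nat → List Char
  | 0 => []
  | n + 1 => pvNuc (PySem.Int.mod i 4) :: pvLsb (PySem.Int.floordiv i 4) n

theorem pvDict_eq (r : Int) (h0 : 0 ≤ r) (h4 : r < 4) :
    ((PySem.Dict.ofList [((0:Int), 'A'), (1, 'C'), (2, 'G'), (3, 'T')]).get? r).getD ' '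
      = pvNuc r := by
  interval_cases r <;> decide

theorem pvStr_eq (r : Int) (h0 : 0 ≤ r) (h4 : r < 4) :
    (PySem.Str.pyGet? "ACGT" r).getD ' ' = pvNuc r := by
  interval_cases r <;> decide

-- A's fold appends pvLsb of the running index, one character per iteration
theorem pvFoldA (l : List Int) (acc : List Char) (i : Int) :
    (l.foldl
      (fun (st : List Char × Int) _i =>
        (st.1 ++ [((PySem.Dict.ofList [((0:Int), 'A'), (1, 'C'), (2, 'G'), (3, 'T')]).get?
            (PySem.Int.mod st.2 4)).getD ' '],
         PySem.Int.floordiv st.2 4))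
      (acc, i)).1 = acc ++ pvLsb i l.length := by
  induction l generalizing acc i with
  | nil => simp [pvLsb]
  | cons x xs ih =>
      rw [List.foldl_cons, ih, List.length_cons, pvLsb,
        pvDict_eq _ (PySem.Int.mod_nonneg i (by norm_num)) (PySem.Int.mod_lt i (by norm_num))]
      simp

-- closed form of the lsb digits
theorem pvLsb_closed (n : Nat) (i : Int) :
    pvLsb i n = (List.range n).map (pvDig i) := by
  induction n generalizing i with
  | zero => rfl
  | succ n ih =>
      rw [List.range_succ_eq_map]
      simp only [List.map_cons, List.map_map, pvLsb, ih]
      congr 1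
      · unfold pvDig
        norm_num [PySem.Int.floordiv_eq_ediv_of_pos (show (0:Int) < 1 by norm_num)]
      · apply List.map_congr_left
        intro j _
        unfold pvDig
        have h1 : PySem.Int.floordiv (PySem.Int.floordiv i 4) ((4 : Int) ^ j)
            = PySem.Int.floordiv i ((4 : Int) ^ (j + 1)) := by
          rw [PySem.Int.floordiv_eq_ediv_of_pos (by norm_num),
              PySem.Int.floordiv_eq_ediv_of_pos (by positivity),
              PySem.Int.floordiv_eq_ediv_of_pos (by positivity),
              Int.ediv_ediv_of_nonneg (by norm_num)]
          norm_num [pow_succ, mul_comm]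
        rw [Function.comp_apply, h1]

-- upper digits: digit j of i // 4^h is digit h+j of i
theorem pvDig_hi (i : Int) (hN j : Nat) :
    pvDig (PySem.Int.floordiv i ((4 : Int) ^ hN)) j = pvDig i (hN + j) := by
  unfold pvDig
  rw [PySem.Int.floordiv_eq_ediv_of_pos (by positivity),
      PySem.Int.floordiv_eq_ediv_of_pos (by positivity),
      PySem.Int.floordiv_eq_ediv_of_pos (by positivity),
      Int.ediv_ediv_of_nonneg (by positivity), ← pow_add]

-- lower digits: digit j of i % 4^h is digit j of i, for j < h
theorem pvDig_lo (i : Int) (hN j : Nat) (hj : j < hN) :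
    pvDig (PySem.Int.mod i ((4 : Int) ^ hN)) j = pvDig i j := by
  unfold pvDig
  congr 1
  have hp : (0 : Int) < 4 ^ j := by positivity
  rw [PySem.Int.mod_eq_emod_of_pos (by positivity),
      PySem.Int.floordiv_eq_ediv_of_pos hp,
      PySem.Int.floordiv_eq_ediv_of_pos hp,
      PySem.Int.mod_eq_emod_of_pos (by norm_num),
      PySem.Int.mod_eq_emod_of_pos (by norm_num)]
  have hsplit : i % (4 : Int) ^ hN = i + -(i / 4 ^ hN) * (4 ^ (hN - j - 1) * 4) * 4 ^ j := by
    rw [Int.emod_def]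
    have : (4 : Int) ^ hN = 4 ^ (hN - j - 1) * 4 * 4 ^ j := by
      rw [mul_assoc, ← pow_succ', ← pow_add]
      congr 1
      omega
    rw [this]; ring
  rw [hsplit, Int.add_mul_ediv_right _ _ (by positivity : (4:Int) ^ j ≠ 0),
      show -(i / 4 ^ hN) * (4 ^ (hN - j - 1) * 4) = 4 * (-(i / 4 ^ hN) * 4 ^ (hN - j - 1)) from by
        ring]
  exact Int.add_mul_emod_self_left _ _ _

-- closed form of B's divide-and-conquer: msb-first digits = reverse of the digit list
theorem pvAltChars_closed (n : Nat) : ∀ (k index : Int), k.toNat = n →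
    pvAltChars index k = ((List.range k.toNat).map (pvDig index)).reverse := by
  induction n using Nat.strong_induction_on with
  | _ n ih =>
    intro k index hk
    unfold pvAltChars
    by_cases h0 : k ≤ 0
    · simp [h0, Int.toNat_of_nonpos h0]
    · by_cases h1 : k = 1
      · subst h1
        rw [if_neg h0, if_pos rfl]
        have : ((1 : Int)).toNat = 1 := rfl
        rw [this, List.range_one, List.map_singleton, List.reverse_singleton]
        unfold pvDig
        rw [pvStr_eq _ (PySem.Int.mod_nonneg _ (by norm_num)) (PySem.Int.mod_lt _ (by norm_num))]
        norm_num [PySem.Int.floordiv_eq_ediv_of_pos (show (0:Int) < 1 by norm_num)]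
      · -- k ≥ 2
        have hk2 : 2 ≤ k := by omega
        rw [if_neg h0, if_neg h1]
        dsimp only
        set h : Int := PySem.Int.floordiv k 2 with hh
        have hediv : h = k / 2 := PySem.Int.floordiv_eq_ediv_of_pos (by norm_num)
        have hb1 : 1 ≤ h := by rw [hediv]; omega
        have hbk : h ≤ k - 1 := by rw [hediv]; omega
        have hpow : ((4 : Int) ^ h.toNat) ≠ 0 := by positivity
        rw [show PySem.Int.divmod? index ((4 : Int) ^ h.toNat)
              = some (PySem.Int.floordiv index ((4 : Int) ^ h.toNat),
                      PySem.Int.mod index ((4 : Int) ^ h.toNat)) by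
            simp only [PySem.Int.divmod?, if_neg hpow]; rfl]
        simp only [Option.getD_some]
        rw [ih (k - h).toNat (by omega) (k - h) _ rfl,
            ih h.toNat (by omega) h _ rfl]
        rw [show k.toNat = h.toNat + (k - h).toNat by omega, List.range_add,
            List.map_append, List.reverse_append, List.map_map]
        congr 1
        · congr 1
          apply List.map_congr_left
          intro j hj
          rw [Function.comp_apply, pvDig_hi]
        · congr 1
          apply List.map_congr_left
          intro j hj
          exact pvDig_lo index h.toNat j (by
            have := List.mem_range.mp hj
            omega)

theorem IndexToPattern_spec_aux (index k : Int) :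
    IndexToPattern index k = IndexToPattern_alt index k := by
  unfold IndexToPattern IndexToPattern_alt
  dsimp only
  rw [pvFoldA, PySem.List.length_pyRange_one, List.nil_append, Int.sub_zero,
      pvLsb_closed, pvAltChars_closed k.toNat k index rfl]

-- ===== VERDICT (by name: the statement is the Claim_ definition above) =====
theorem IndexToPattern_spec : Claim_equal_IndexToPattern := by
  intro index k _
  exact IndexToPattern_spec_aux index k
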